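-- pv_equiv track=rewrite | github.com/prem-banker/Hackerrank-Questions | queens.py | checkSides
-- ===== SOURCE A (Python) =====
-- def checkSides(x,y,arr1,arr2,n):
--     top = n-x   #1
--     bottom = x-1#3== 1
--     left = y-1#2 == 0
--     right = n - y #2
--     for i in range(len(arr1)):
--         xdis = arr1[i]-x#1
--         ydis = arr2[i] -y
--
--         if x == arr1[i] and ydis <= 0 and -1*ydis < left:
--             if ydis == -1:
--                 left = 0
--             else :
--                 left = -1*ydis -1
--
--         elif x == arr1[i] and 0 < ydis < right:
--             if ydis == 1 :
--                 right = 0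
--             else :
--                 right = ydis - 1
--
--         elif y == arr2[i] and xdis <= 0 and -1*xdis < bottom :
--             if xdis == -1 :
--                 bottom = 0
--             else :
--                 bottom = -1*xdis - 1
--
--         elif y == arr2[i] and 0 < xdis < top:
--             if xdis == 1 :
--                 top = 0
--             else :
--                 top = xdis - 1
--
--
--     sides = top + bottom + left + right
--     return sides
-- ===== SOURCE B (Python) =====
-- # B: decompose into four independent direction scans (row/column obstacle
-- # distances filtered up front, then one shared one-dimensional reducer),
-- # instead of A's single loop over indices with an 8-branch elif chain.
-- def _ray(bound, ds):
--     for d in ds: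
--         if d < bound:
--             bound = d - 1
--     return bound
--
-- def checkSides(x, y, arr1, arr2, n):
--     obs = list(zip(arr1, arr2))
--     left   = _ray(y - 1, [y - b for a, b in obs if a == x and b <= y])
--     right  = _ray(n - y, [b - y for a, b in obs if a == x and b > y])
--     bottom = _ray(x - 1, [x - a for a, b in obs if b == y and a <= x])
--     top    = _ray(n - x, [a - x for a, b in obs if b == y and a > x])
--     return top + bottom + left + right
-- ===== Notes on version B (the rewrite author's own statement) =====
-- stated objective: simpler
-- what changed: A's single index loop threading a 4-field state through an 8-branch elif chain is replaced by four independent per-direction scans: the obstacle distances for each ray are filtered out of zip(arr1,arr2) up front and a single shared one-dimensional reducer shrinks each of the four bounds, the ydis/xdis==+-1 special cases collapsing into the general formula.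
-- outside the precondition, e.g. on checkSides(2, 2, [2], [2], 5): A returns 6, B returns 4
import Mathlib
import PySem

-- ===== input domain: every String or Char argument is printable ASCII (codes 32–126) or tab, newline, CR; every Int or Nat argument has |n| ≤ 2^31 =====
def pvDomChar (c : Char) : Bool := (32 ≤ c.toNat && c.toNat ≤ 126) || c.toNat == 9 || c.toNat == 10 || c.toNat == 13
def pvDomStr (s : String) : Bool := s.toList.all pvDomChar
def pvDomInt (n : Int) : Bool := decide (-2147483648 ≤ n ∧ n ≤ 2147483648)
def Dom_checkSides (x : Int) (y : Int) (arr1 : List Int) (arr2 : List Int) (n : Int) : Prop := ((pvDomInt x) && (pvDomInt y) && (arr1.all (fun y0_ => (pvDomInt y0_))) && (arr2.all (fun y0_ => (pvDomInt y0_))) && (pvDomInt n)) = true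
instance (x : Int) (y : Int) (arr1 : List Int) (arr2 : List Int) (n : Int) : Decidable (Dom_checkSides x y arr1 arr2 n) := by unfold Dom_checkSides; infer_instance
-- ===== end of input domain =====

-- B replaces A's single elif-chain loop by four independent per-direction scans (same cost);
-- Pre_ excludes a mismatched-length pair (A raises IndexError) and an obstacle on the queen's own
-- square (A's elif routing there is accidental).


-- ===== PORT A =====
-- one loop iteration of A's for-loop: state is (top, bottom, left, right), inputs the pair (arr1[i], arr2[i])
def pvStepA (x y : Int) (st : Int × Int × Int × Int) (a b : Int) : Int × Int × Int × Int :=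
  let top := st.1; let bottom := st.2.1; let left := st.2.2.1; let right := st.2.2.2
  let xdis := a - x
  let ydis := b - y
  if x = a ∧ ydis ≤ 0 ∧ -1 * ydis < left then
    if ydis = -1 then (top, bottom, 0, right) else (top, bottom, -1 * ydis - 1, right)
  else if x = a ∧ 0 < ydis ∧ ydis < right then
    if ydis = 1 then (top, bottom, left, 0) else (top, bottom, left, ydis - 1)
  else if y = b ∧ xdis ≤ 0 ∧ -1 * xdis < bottom then
    if xdis = -1 then (top, 0, left, right) else (top, -1 * xdis - 1, left, right)
  else if y = b ∧ 0 < xdis ∧ xdis < top then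
    if xdis = 1 then (0, bottom, left, right) else (xdis - 1, bottom, left, right)
  else (top, bottom, left, right)

def checkSides (x : Int) (y : Int) (arr1 : List Int) (arr2 : List Int) (n : Int) : Int :=
  let top := n - x
  let bottom := x - 1
  let left := y - 1
  let right := n - y
  -- for i in range(len(arr1)): arr1[i], arr2[i]; getD is exact here: Pre_ gives i < len arr1 ≤ len arr2
  let s := (List.range arr1.length).foldl
    (fun st i => pvStepA x y st (arr1.getD i 0) (arr2.getD i 0)) (top, bottom, left, right)
  s.1 + s.2.1 + s.2.2.1 + s.2.2.2

-- ===== PORT B =====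
-- shared one-dimensional reducer: shrink a bound along a list of obstacle distances
def pvRay (bound : Int) (ds : List Int) : Int :=
  ds.foldl (fun bound d => if d < bound then d - 1 else bound) bound

def pvDsLeft (x y : Int) (obs : List (Int × Int)) : List Int :=
  (obs.filter (fun p => p.1 == x && decide (p.2 ≤ y))).map (fun p => y - p.2)
def pvDsRight (x y : Int) (obs : List (Int × Int)) : List Int :=
  (obs.filter (fun p => p.1 == x && decide (y < p.2))).map (fun p => p.2 - y)
def pvDsBottom (x y : Int) (obs : List (Int × Int)) : List Int :=
  (obs.filter (fun p => p.2 == y && decide (p.1 ≤ x))).map (fun p => x - p.1)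
def pvDsTop (x y : Int) (obs : List (Int × Int)) : List Int :=
  (obs.filter (fun p => p.2 == y && decide (x < p.1))).map (fun p => p.1 - x)

def checkSides_alt (x : Int) (y : Int) (arr1 : List Int) (arr2 : List Int) (n : Int) : Int :=
  let obs := arr1.zip arr2
  let left := pvRay (y - 1) (pvDsLeft x y obs)
  let right := pvRay (n - y) (pvDsRight x y obs)
  let bottom := pvRay (x - 1) (pvDsBottom x y obs)
  let top := pvRay (n - x) (pvDsTop x y obs)
  top + bottom + left + right

-- ===== PRECONDITION & SPEC =====
-- Pre_ excludes (i) len(arr1) > len(arr2), where A raises IndexError, and (ii) an obstacle on the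
-- queen's own square, where A's elif chain routes the degenerate obstacle to exactly one of
-- left/bottom depending on loop state — an accident of branch order no caller would specify.
def Pre_checkSides (x : Int) (y : Int) (arr1 : List Int) (arr2 : List Int) (n : Int) : Prop :=
  arr1.length ≤ arr2.length ∧ ∀ p ∈ arr1.zip arr2, ¬(p.1 = x ∧ p.2 = y)
instance (x : Int) (y : Int) (arr1 : List Int) (arr2 : List Int) (n : Int) : Decidable (Pre_checkSides x y arr1 arr2 n) := by unfold Pre_checkSides; infer_instance

def pvWitness_checkSides : Int × Int × List Int × List Int × Int := (2, 3, [2, 4], [1, 3], 5)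

def Spec_checkSides (x : Int) (y : Int) (arr1 : List Int) (arr2 : List Int) (n : Int) (out : Int) : Prop := out = checkSides_alt x y arr1 arr2 n
instance (x : Int) (y : Int) (arr1 : List Int) (arr2 : List Int) (n : Int) (out : Int) : Decidable (Spec_checkSides x y arr1 arr2 n out) := by unfold Spec_checkSides; infer_instance

-- ===== CLAIM (what is proved, stated in full; the proofs are below) =====
def Claim_equal_checkSides : Prop := ∀ (x : Int) (y : Int) (arr1 : List Int) (arr2 : List Int) (n : Int), Dom_checkSides x y arr1 arr2 n → Pre_checkSides x y arr1 arr2 n → Spec_checkSides x y arr1 arr2 n (checkSides x y arr1 arr2 n)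

-- ===== LEMMAS AND PROOFS =====

-- one step of A equals a one-step shrink of each of the four rays (obstacle not on the queen's square)
theorem pvStepA_eq (x y a b t bo l r : Int) (hne : ¬(a = x ∧ b = y)) :
    pvStepA x y (t, bo, l, r) a b =
      (pvRay t (pvDsTop x y [(a, b)]), pvRay bo (pvDsBottom x y [(a, b)]),
       pvRay l (pvDsLeft x y [(a, b)]), pvRay r (pvDsRight x y [(a, b)])) := by
  by_cases hax : a = x
  · have hby : ¬ b = y := fun hb => hne ⟨hax, hb⟩
    have hTop : pvRay t (pvDsTop x y [(a, b)]) = t := by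
      simp [pvDsTop, pvRay, hby]
    have hBot : pvRay bo (pvDsBottom x y [(a, b)]) = bo := by
      simp [pvDsBottom, pvRay, hby]
    by_cases hb : b ≤ y
    · -- same row, obstacle to the left
      have hL : pvRay l (pvDsLeft x y [(a, b)]) = if y - b < l then y - b - 1 else l := by
        simp [pvDsLeft, pvRay, hax, hb]
      have hR : pvRay r (pvDsRight x y [(a, b)]) = r := by
        simp [pvDsRight, pvRay, not_lt.mpr hb]
      rw [hTop, hBot, hL, hR]
      simp only [pvStepA]
      by_cases hc : y - b < l
      · rw [if_pos hc,
            if_pos (show x = a ∧ b - y ≤ 0 ∧ -1 * (b - y) < l from ⟨hax.symm, by omega, by omega⟩)]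
        by_cases h1 : b - y = -1
        · rw [if_pos h1, show y - b - 1 = (0 : Int) from by omega]
        · rw [if_neg h1, show -1 * (b - y) - 1 = y - b - 1 from by omega]
      · rw [if_neg hc,
            if_neg (show ¬(x = a ∧ b - y ≤ 0 ∧ -1 * (b - y) < l) from fun h => by omega),
            if_neg (show ¬(x = a ∧ 0 < b - y ∧ b - y < r) from fun h => by omega),
            if_neg (show ¬(y = b ∧ a - x ≤ 0 ∧ -1 * (a - x) < bo) from fun h => hby h.1.symm),
            if_neg (show ¬(y = b ∧ 0 < a - x ∧ a - x < t) from fun h => hby h.1.symm)]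
    · -- same row, obstacle to the right
      have hL : pvRay l (pvDsLeft x y [(a, b)]) = l := by
        simp [pvDsLeft, pvRay, hb]
      have hR : pvRay r (pvDsRight x y [(a, b)]) = if b - y < r then b - y - 1 else r := by
        simp [pvDsRight, pvRay, hax, lt_of_not_ge hb]
      rw [hTop, hBot, hL, hR]
      simp only [pvStepA]
      rw [if_neg (show ¬(x = a ∧ b - y ≤ 0 ∧ -1 * (b - y) < l) from fun h => by omega)]
      by_cases hc : b - y < r
      · rw [if_pos hc, if_pos (show x = a ∧ 0 < b - y ∧ b - y < r from ⟨hax.symm, by omega, hc⟩)]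
        by_cases h1 : b - y = 1
        · rw [if_pos h1, show b - y - 1 = (0 : Int) from by omega]
        · rw [if_neg h1]
      · rw [if_neg hc,
            if_neg (show ¬(x = a ∧ 0 < b - y ∧ b - y < r) from fun h => hc h.2.2),
            if_neg (show ¬(y = b ∧ a - x ≤ 0 ∧ -1 * (a - x) < bo) from fun h => hby h.1.symm),
            if_neg (show ¬(y = b ∧ 0 < a - x ∧ a - x < t) from fun h => hby h.1.symm)]
  · have hL : pvRay l (pvDsLeft x y [(a, b)]) = l := by
      simp [pvDsLeft, pvRay, hax]
    have hR : pvRay r (pvDsRight x y [(a, b)]) = r := by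
      simp [pvDsRight, pvRay, hax]
    by_cases hby : b = y
    · by_cases ha : a ≤ x
      · -- same column, obstacle below
        have hTop : pvRay t (pvDsTop x y [(a, b)]) = t := by
          simp [pvDsTop, pvRay, not_lt.mpr ha]
        have hBot : pvRay bo (pvDsBottom x y [(a, b)]) = if x - a < bo then x - a - 1 else bo := by
          simp [pvDsBottom, pvRay, hby, ha]
        rw [hTop, hBot, hL, hR]
        simp only [pvStepA]
        rw [if_neg (show ¬(x = a ∧ b - y ≤ 0 ∧ -1 * (b - y) < l) from fun h => hax h.1.symm),
            if_neg (show ¬(x = a ∧ 0 < b - y ∧ b - y < r) from fun h => hax h.1.symm)]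
        by_cases hc : x - a < bo
        · rw [if_pos hc,
              if_pos (show y = b ∧ a - x ≤ 0 ∧ -1 * (a - x) < bo from ⟨hby.symm, by omega, by omega⟩)]
          by_cases h1 : a - x = -1
          · rw [if_pos h1, show x - a - 1 = (0 : Int) from by omega]
          · rw [if_neg h1, show -1 * (a - x) - 1 = x - a - 1 from by omega]
        · rw [if_neg hc,
              if_neg (show ¬(y = b ∧ a - x ≤ 0 ∧ -1 * (a - x) < bo) from fun h => by omega),
              if_neg (show ¬(y = b ∧ 0 < a - x ∧ a - x < t) from fun h => by omega)]
      · -- same column, obstacle above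
        have hTop : pvRay t (pvDsTop x y [(a, b)]) = if a - x < t then a - x - 1 else t := by
          simp [pvDsTop, pvRay, hby, lt_of_not_ge ha]
        have hBot : pvRay bo (pvDsBottom x y [(a, b)]) = bo := by
          simp [pvDsBottom, pvRay, ha]
        rw [hTop, hBot, hL, hR]
        simp only [pvStepA]
        rw [if_neg (show ¬(x = a ∧ b - y ≤ 0 ∧ -1 * (b - y) < l) from fun h => hax h.1.symm),
            if_neg (show ¬(x = a ∧ 0 < b - y ∧ b - y < r) from fun h => hax h.1.symm),
            if_neg (show ¬(y = b ∧ a - x ≤ 0 ∧ -1 * (a - x) < bo) from fun h => by omega)]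
        by_cases hc : a - x < t
        · rw [if_pos hc, if_pos (show y = b ∧ 0 < a - x ∧ a - x < t from ⟨hby.symm, by omega, hc⟩)]
          by_cases h1 : a - x = 1
          · rw [if_pos h1, show a - x - 1 = (0 : Int) from by omega]
          · rw [if_neg h1]
        · rw [if_neg hc,
              if_neg (show ¬(y = b ∧ 0 < a - x ∧ a - x < t) from fun h => hc h.2.2)]
    · -- obstacle in neither line: nothing changes
      have hTop : pvRay t (pvDsTop x y [(a, b)]) = t := by
        simp [pvDsTop, pvRay, hby]
      have hBot : pvRay bo (pvDsBottom x y [(a, b)]) = bo := by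
        simp [pvDsBottom, pvRay, hby]
      rw [hTop, hBot, hL, hR]
      simp only [pvStepA]
      rw [if_neg (show ¬(x = a ∧ b - y ≤ 0 ∧ -1 * (b - y) < l) from fun h => hax h.1.symm),
          if_neg (show ¬(x = a ∧ 0 < b - y ∧ b - y < r) from fun h => hax h.1.symm),
          if_neg (show ¬(y = b ∧ a - x ≤ 0 ∧ -1 * (a - x) < bo) from fun h => hby h.1.symm),
          if_neg (show ¬(y = b ∧ 0 < a - x ∧ a - x < t) from fun h => hby h.1.symm)]

theorem pvFoldA_eq (x y : Int) (obs : List (Int × Int))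
    (h : ∀ p ∈ obs, ¬(p.1 = x ∧ p.2 = y)) :
    ∀ (t bo l r : Int),
      obs.foldl (fun st p => pvStepA x y st p.1 p.2) (t, bo, l, r) =
        (pvRay t (pvDsTop x y obs), pvRay bo (pvDsBottom x y obs),
         pvRay l (pvDsLeft x y obs), pvRay r (pvDsRight x y obs)) := by
  induction obs with
  | nil => intro t bo l r; simp [pvRay, pvDsTop, pvDsBottom, pvDsLeft, pvDsRight]
  | cons p rest ih =>
    intro t bo l r
    have hp : ¬(p.1 = x ∧ p.2 = y) := h p (by simp)
    have hrest : ∀ q ∈ rest, ¬(q.1 = x ∧ q.2 = y) := fun q hq => h q (by simp [hq])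
    rw [List.foldl_cons]
    rw [show pvStepA x y (t, bo, l, r) p.1 p.2
        = (pvRay t (pvDsTop x y [(p.1, p.2)]), pvRay bo (pvDsBottom x y [(p.1, p.2)]),
           pvRay l (pvDsLeft x y [(p.1, p.2)]), pvRay r (pvDsRight x y [(p.1, p.2)]))
      from pvStepA_eq x y p.1 p.2 t bo l r (by simpa using hp)]
    rw [ih hrest]
    -- each direction list on a cons is the singleton list followed by the rest's list
    have hds : ∀ (f : List (Int × Int) → List Int),
        (f = pvDsTop x y ∨ f = pvDsBottom x y ∨ f = pvDsLeft x y ∨ f = pvDsRight x y) →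
        f (p :: rest) = f [(p.1, p.2)] ++ f rest := by
      rintro f (rfl | rfl | rfl | rfl) <;>
        simp only [pvDsTop, pvDsBottom, pvDsLeft, pvDsRight, List.filter_cons, List.filter_nil] <;>
        split <;> simp
    rw [hds _ (Or.inl rfl), hds _ (Or.inr (Or.inl rfl)),
        hds _ (Or.inr (Or.inr (Or.inl rfl))), hds _ (Or.inr (Or.inr (Or.inr rfl)))]
    simp [pvRay, List.foldl_append]

-- A's fold over indices equals the fold over the zipped pairs when arr2 is long enough
theorem pvRangeFold_eq_zipFold {α : Type} (g : α → Int → Int → α) :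
    ∀ (l1 l2 : List Int) (s : α), l1.length ≤ l2.length →
      (List.range l1.length).foldl (fun s i => g s (l1.getD i 0) (l2.getD i 0)) s
        = (l1.zip l2).foldl (fun s p => g s p.1 p.2) s := by
  intro l1
  induction l1 with
  | nil => intro l2 s _; simp
  | cons a t ih =>
    intro l2 s hlen
    cases l2 with
    | nil => simp at hlen
    | cons b t2 =>
      simp only [List.length_cons]
      rw [List.range_succ_eq_map, List.foldl_cons, List.foldl_map]
      simp only [List.getD_cons_zero, List.getD_cons_succ, List.zip_cons_cons, List.foldl_cons]
      exact ih t2 (g s a b) (by simpa using hlen)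

-- ===== VERDICT (by name: the statement is the Claim_ definition above) =====
theorem checkSides_spec : Claim_equal_checkSides := by
  intro x y arr1 arr2 n _ hpre
  obtain ⟨hlen, hno⟩ := hpre
  show checkSides x y arr1 arr2 n = checkSides_alt x y arr1 arr2 n
  simp only [checkSides, checkSides_alt]
  rw [pvRangeFold_eq_zipFold (pvStepA x y) arr1 arr2 _ hlen,
      pvFoldA_eq x y (arr1.zip arr2) hno]
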